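-- pv_equiv track=rewrite | github.com/marcotcr/pyformlang | pyformlang/regular_expression/regex.py | preprocess_regex
-- ===== SOURCE A (Python) =====
-- def preprocess_regex(regex: str) -> str:
--     """ Preprocess a regex represented as a string
--
--     Parameters
--     ----------
--     regex : str
--         The regex represented as a string
--
--     Returns
--     ----------
--     regex_prepro : str
--         The preprocessed regex
--     """
--     res = []
--     pos = 0
--     for current_c in regex:
--         if not current_c.isalnum() and pos != 0 and regex[pos-1] != " ":
--             res.append(" ")
--         res.append(current_c)
--         if not current_c.isalnum() and pos != len(regex) - 1 and regex[pos+1] != " ":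
--             res.append(" ")
--         pos += 1
--     return "".join(res)
-- ===== SOURCE B (Python) =====
-- def preprocess_regex(regex: str) -> str:
--     gaps = [
--         (not p.isalnum() and c != " ") + (not c.isalnum() and p != " ")
--         for p, c in zip(regex, regex[1:])
--     ]
--     return "".join(c + " " * g for c, g in zip(regex, gaps + [0]))
-- ===== Notes on version B (the rewrite author's own statement) =====
-- stated objective: alternative
-- what changed: Two staged passes instead of A's single pass of conditional appends: B first computes an integer gap width for every adjacent character boundary by boolean arithmetic, then renders the result in a second pass that joins each character with that many repeated spaces.
import Mathlib
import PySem

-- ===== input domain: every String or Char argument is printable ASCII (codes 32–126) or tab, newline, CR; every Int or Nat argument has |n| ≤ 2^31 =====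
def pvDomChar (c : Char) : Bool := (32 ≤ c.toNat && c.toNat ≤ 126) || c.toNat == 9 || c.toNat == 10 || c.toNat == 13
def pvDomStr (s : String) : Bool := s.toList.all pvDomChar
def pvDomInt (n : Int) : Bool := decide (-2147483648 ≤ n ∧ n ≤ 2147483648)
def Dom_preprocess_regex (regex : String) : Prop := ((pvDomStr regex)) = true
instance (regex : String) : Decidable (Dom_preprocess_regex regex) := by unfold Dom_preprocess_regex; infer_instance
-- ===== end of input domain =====

-- B replaces A's single conditional-append pass by two staged passes: compute an
-- integer gap width per adjacent boundary, then render each character followed by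
-- that many spaces (alternative decomposition, same O(n) cost).

-- ===== PORT A =====
-- loop body of A's `for current_c in regex` (res list, pos counter, indexing into regex)
def pvStepA (regex : String) (st : List Char × Int) (current_c : Char) : List Char × Int :=
  let res := st.1
  let pos := st.2
  let res := if !(PySem.Chars.isalnum current_c) && pos != 0
                && PySem.Str.pyGet? regex (pos - 1) != some ' '
             then res ++ [' '] else res
  let res := res ++ [current_c]
  let res := if !(PySem.Chars.isalnum current_c) && pos != PySem.Str.len regex - 1
                && PySem.Str.pyGet? regex (pos + 1) != some ' '
             then res ++ [' '] else res
  (res, pos + 1)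

def preprocess_regex (regex : String) : String :=
  String.ofList (regex.toList.foldl (pvStepA regex) ([], 0)).1

-- ===== PORT B =====
-- B's gap width: (not p.isalnum() and c != " ") + (not c.isalnum() and p != " ")
def pvGap (p c : Char) : Int :=
  (if !(PySem.Chars.isalnum p) && c != ' ' then 1 else 0)
  + (if !(PySem.Chars.isalnum c) && p != ' ' then 1 else 0)

def preprocess_regex_alt (regex : String) : String :=
  let l := regex.toList
  -- gaps = [... for p, c in zip(regex, regex[1:])]
  let gaps : List Int := (l.zip (PySem.List.slice l (some 1) none)).map (fun pc => pvGap pc.1 pc.2)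
  -- "".join(c + " " * g for c, g in zip(regex, gaps + [0]))
  String.ofList ((l.zip (gaps ++ [(0 : Int)])).flatMap
    (fun cg => cg.1 :: List.replicate cg.2.toNat ' '))

-- ===== PRECONDITION & SPEC =====
def Spec_preprocess_regex (regex : String) (out : String) : Prop := out = preprocess_regex_alt regex
instance (regex : String) (out : String) : Decidable (Spec_preprocess_regex regex out) := by unfold Spec_preprocess_regex; infer_instance

-- ===== CLAIM (what is proved, stated in full; the proofs are below) =====
def Claim_equal_preprocess_regex : Prop := ∀ (regex : String), Dom_preprocess_regex regex → Spec_preprocess_regex regex (preprocess_regex regex)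

-- ===== LEMMAS AND PROOFS =====

/-- the space inserted after `p` when followed by `c` -/
def pvTrail (p c : Char) : List Char := if !(PySem.Chars.isalnum p) && c != ' ' then [' '] else []
/-- the space inserted before `c` when preceded by `p` -/
def pvLead (p c : Char) : List Char := if !(PySem.Chars.isalnum c) && p != ' ' then [' '] else []
/-- the separator plus the character emitted for one adjacent pair -/
def pvPairEmit (p c : Char) : List Char := pvTrail p c ++ pvLead p c ++ [c]
/-- the trailing space A emits at a position whose successor list is `s` -/
def pvTrailHead (c : Char) (s : List Char) : List Char :=
  match s with
  | [] => []
  | d :: _ => pvTrail c d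
/-- what A's loop emits from position k on (prev = char at k-1), each step's
    trailing space grouped with its own step -/
def pvTailOut : Char → List Char → List Char
  | _, [] => []
  | prev, c :: s => pvLead prev c ++ [c] ++ pvTrailHead c s ++ pvTailOut c s

lemma pvSomeBne (d e : Char) : (some d != some e) = (d != e) := by simp [bne]

/-- B's rendered gap equals A's two conditional spaces for that boundary -/
lemma pvRepGap (p c : Char) :
    List.replicate (pvGap p c).toNat ' ' = pvTrail p c ++ pvLead p c := by
  unfold pvGap pvTrail pvLead
  split_ifs <;> rfl

/-- shift B's "char then following gap" grouping to the pairwise grouping -/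
lemma pvShift (s : List Char) : ∀ c : Char,
    ((c :: s).zip ((((c :: s).zip s).map (fun pc => pvGap pc.1 pc.2)) ++ [(0 : Int)])).flatMap
        (fun cg => cg.1 :: List.replicate cg.2.toNat ' ')
      = c :: ((c :: s).zip s).flatMap (fun pc => pvPairEmit pc.1 pc.2) := by
  induction s with
  | nil => intro c; rfl
  | cons d t ih =>
    intro c
    simp only [List.zip_cons_cons, List.map_cons, List.cons_append, List.flatMap_cons,
      pvRepGap, ih d, pvPairEmit]
    simp

lemma pvBridge (s : List Char) (prev : Char) :
    pvTrailHead prev s ++ pvTailOut prev s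
      = ((prev :: s).zip s).flatMap (fun pc => pvPairEmit pc.1 pc.2) := by
  induction s generalizing prev with
  | nil => simp [pvTrailHead, pvTailOut]
  | cons c s ih =>
    rw [show pvTrailHead prev (c :: s) = pvTrail prev c from rfl,
      show pvTailOut prev (c :: s) = pvLead prev c ++ [c] ++ pvTrailHead c s ++ pvTailOut c s from rfl,
      List.zip_cons_cons, List.flatMap_cons, ← ih c]
    simp [pvPairEmit]

lemma pvCoreA (regex : String) :
    ∀ (s pre : List Char) (prev : Char) (res : List Char),
      regex.toList = pre ++ prev :: s →
      (s.foldl (pvStepA regex) (res, ((pre.length + 1 : Nat) : Int))).1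
        = res ++ pvTailOut prev s := by
  intro s
  induction s with
  | nil => intro pre prev res _; simp [pvTailOut]
  | cons c s ih =>
    intro pre prev res h
    have hL : (regex.length : Int) = pre.length + 2 + s.length := by
      have : regex.toList.length = pre.length + 2 + s.length := by rw [h]; simp; omega
      rw [← String.length_toList, this]; push_cast; ring
    have hget1 : PySem.Str.pyGet? regex (((pre.length + 1 : Nat) : Int) - 1) = some prev := by
      have : (((pre.length + 1 : Nat) : Int) - 1) = ((pre.length : Nat) : Int) := by push_cast; ring
      rw [this, PySem.Str.pyGet?_natCast, h]
      simp
    have hne0 : (((pre.length + 1 : Nat) : Int) != 0) = true := by simp; omega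
    cases s with
    | nil =>
      -- last character: pos = len - 1, no trailing space
      simp only [List.length_nil, Int.natCast_zero] at hL
      have hlast : (((pre.length + 1 : Nat) : Int) != PySem.Str.len regex - 1) = false := by
        simp [PySem.Str.len]
        omega
      simp only [List.foldl_cons, List.foldl_nil, pvStepA, hget1, hne0, hlast,
        Bool.and_false, Bool.false_and, Bool.and_true, pvTailOut, pvTrailHead, pvLead,
        pvSomeBne]
      cases hb : (!PySem.Chars.isalnum c && (prev != ' ')) <;> simp
    | cons d t =>
      simp only [List.length_cons] at hL
      have hnotlast : (((pre.length + 1 : Nat) : Int) != PySem.Str.len regex - 1) = true := by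
        simp [PySem.Str.len]
        omega
      have hget2 : PySem.Str.pyGet? regex (((pre.length + 1 : Nat) : Int) + 1) = some d := by
        have h2 : (((pre.length + 1 : Nat) : Int) + 1) = ((pre.length + 2 : Nat) : Int) := by push_cast; ring
        rw [h2, PySem.Str.pyGet?_natCast, h]
        rw [show pre.length + 2 = (pre ++ [prev, c]).length by simp,
          show pre ++ prev :: c :: d :: t = (pre ++ [prev, c]) ++ d :: t by simp]
        simp
      have hrec := ih (pre ++ [prev]) c
        ((res ++ pvLead prev c ++ [c]) ++ pvTrailHead c (d :: t)) (by simp [h])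
      simp only [List.length_append, List.length_cons, List.length_nil] at hrec
      simp only [List.foldl_cons, pvStepA, hget1, hne0, hnotlast, hget2,
        Bool.and_true, pvSomeBne]
      have hcast : (((pre.length + 1 : Nat) : Int)) + 1 = (((pre.length + 0 + 1 + 1 : Nat)) : Int) := by
        push_cast; ring
      rw [show pvTailOut prev (c :: d :: t)
            = pvLead prev c ++ [c] ++ pvTrailHead c (d :: t) ++ pvTailOut c (d :: t) from rfl]
      have goalrw : ∀ r1 : List Char,
          r1 = (res ++ pvLead prev c ++ [c]) ++ pvTrailHead c (d :: t) →
          ((d :: t).foldl (pvStepA regex) (r1, (((pre.length + 1 : Nat) : Int)) + 1)).1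
            = res ++ (pvLead prev c ++ [c] ++ pvTrailHead c (d :: t) ++ pvTailOut c (d :: t)) := by
        intro r1 hr1
        rw [hr1, hcast, hrec]; simp
      apply goalrw
      simp only [pvLead, pvTrailHead, pvTrail]
      cases hb1 : (!PySem.Chars.isalnum c && (prev != ' ')) <;>
        cases hb2 : (!PySem.Chars.isalnum c && (d != ' ')) <;> (try simp) <;> (try rfl)

-- ===== VERDICT (by name: the statement is the Claim_ definition above) =====
theorem preprocess_regex_spec : Claim_equal_preprocess_regex := by
  intro regex _
  unfold Spec_preprocess_regex preprocess_regex preprocess_regex_alt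
  cases hl : regex.toList with
  | nil => simp
  | cons c rest =>
    have hslice : PySem.List.slice (c :: rest) (some 1) none = rest := by
      simp [PySem.List.slice_from]
    simp only [hslice, pvShift, ← pvBridge]
    -- evaluate A's first step (pos = 0)
    have hL : (regex.length : Int) = 1 + rest.length := by
      have : regex.toList.length = 1 + rest.length := by rw [hl]; simp; omega
      rw [← String.length_toList, this]; push_cast; ring
    have hfirst : pvStepA regex ([], 0) c = ([c] ++ pvTrailHead c rest, 1) := by
      cases rest with
      | nil =>
        simp only [List.length_nil, Int.natCast_zero] at hL
        have hlast : ((0 : Int) != PySem.Str.len regex - 1) = false := by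
          simp [PySem.Str.len]; omega
        simp only [pvStepA, hlast, Bool.and_false, Bool.false_and, bne_self_eq_false, pvTrailHead]
        simp
      | cons d t =>
        have hget : PySem.Str.pyGet? regex ((0 : Int) + 1) = some d := by
          rw [show ((0 : Int) + 1) = ((1 : Nat) : Int) by norm_num, PySem.Str.pyGet?_natCast, hl]
          simp
        have hne : ((0 : Int) != PySem.Str.len regex - 1) = true := by
          simp [PySem.Str.len]
          simp only [List.length_cons] at hL
          omega
        simp only [pvStepA, hget, hne, Bool.and_true, pvTrailHead, pvTrail,
          pvSomeBne, bne_self_eq_false, Bool.and_false, Bool.false_and]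
        cases hb : (!PySem.Chars.isalnum c && (d != ' ')) <;> simp
    have hcore := pvCoreA regex rest [] c ([c] ++ pvTrailHead c rest) (by simp [hl])
    simp only [List.length_nil] at hcore
    simp only [List.foldl_cons, hfirst]
    norm_num at hcore
    simp only [List.singleton_append]
    rw [hcore]
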